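-- pv_equiv track=rewrite | github.com/scottpeterman/termtelent | rapidcmdb/blueprints/drawpyo_exporter.py | _check_defaults
-- ===== SOURCE A (Python) =====
-- from typing import Dict, List, Tuple, Optional, Any
--
-- def _check_defaults(defaults: Dict, platform: str, node_id: str) -> Optional[str]:
--     """Apply defaults with educated guessing"""
--     # Try platform-based guessing
--     if any(term in platform for term in ['switch', 'nexus', 'catalyst']):
--         return defaults.get('default_switch')
--     elif any(term in platform for term in ['router', 'isr', 'asr']):
--         return defaults.get('default_router')
--     elif any(term in platform for term in ['firewall', 'asa', 'ftd']):
--         return defaults.get('default_firewall')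
--     elif any(term in platform for term in ['phone', 'voip']):
--         return defaults.get('default_phone')
--     elif any(term in platform for term in ['server', 'virtual']):
--         return defaults.get('default_server')
--     else:
--         return defaults.get('default_unknown')
-- ===== SOURCE B (Python) =====
-- _PRIORITY = {
--     'switch': 0, 'nexus': 0, 'catalyst': 0,
--     'router': 1, 'isr': 1, 'asr': 1,
--     'firewall': 2, 'asa': 2, 'ftd': 2,
--     'phone': 3, 'voip': 3,
--     'server': 4, 'virtual': 4,
-- }
-- _KEYS = ['default_switch', 'default_router', 'default_firewall',
--          'default_phone', 'default_server', 'default_unknown']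
--
-- def _check_defaults(defaults, platform, node_id):
--     """Apply defaults: minimum category priority over all matched keywords."""
--     best = 5
--     for term, pri in _PRIORITY.items():
--         if pri < best and term in platform:
--             best = pri
--     return defaults.get(_KEYS[best])
-- ===== Notes on version B (the rewrite author's own statement) =====
-- stated objective: alternative
-- what changed: Replaces the ordered if/elif group chain (early exit at first matching group) by a flat keyword-to-priority map scanned in one full pass keeping the minimum matched priority, which then indexes a key table; correct because the first matching group is exactly the group of minimal index among matched keywords.
import Mathlib
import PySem

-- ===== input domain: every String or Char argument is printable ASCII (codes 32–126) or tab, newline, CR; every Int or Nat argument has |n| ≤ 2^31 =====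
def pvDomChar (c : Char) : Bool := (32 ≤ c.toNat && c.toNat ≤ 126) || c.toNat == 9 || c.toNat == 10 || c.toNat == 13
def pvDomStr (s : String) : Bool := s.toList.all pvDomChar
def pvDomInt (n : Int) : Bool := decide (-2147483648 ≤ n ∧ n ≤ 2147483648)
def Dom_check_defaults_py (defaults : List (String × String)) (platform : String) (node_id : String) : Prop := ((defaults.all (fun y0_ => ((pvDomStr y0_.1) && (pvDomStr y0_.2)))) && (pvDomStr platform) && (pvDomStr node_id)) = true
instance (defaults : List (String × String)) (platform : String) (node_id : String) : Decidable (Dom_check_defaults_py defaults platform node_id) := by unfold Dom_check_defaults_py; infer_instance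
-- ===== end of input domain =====

-- B replaces A's if/elif group chain by a one-pass minimum-priority scan over a flat keyword map (objective: alternative).


-- ===== PORT A =====
-- literal transliteration of A's if/elif chain; 'term in platform' = PySem.Str.isIn
def check_defaults_py (defaults : List (String × String)) (platform : String) (node_id : String) : Option String :=
  if ["switch", "nexus", "catalyst"].any (fun term => PySem.Str.isIn term platform) then
    (PySem.Dict.mk defaults).get? "default_switch"
  else if ["router", "isr", "asr"].any (fun term => PySem.Str.isIn term platform) then
    (PySem.Dict.mk defaults).get? "default_router"
  else if ["firewall", "asa", "ftd"].any (fun term => PySem.Str.isIn term platform) then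
    (PySem.Dict.mk defaults).get? "default_firewall"
  else if ["phone", "voip"].any (fun term => PySem.Str.isIn term platform) then
    (PySem.Dict.mk defaults).get? "default_phone"
  else if ["server", "virtual"].any (fun term => PySem.Str.isIn term platform) then
    (PySem.Dict.mk defaults).get? "default_server"
  else
    (PySem.Dict.mk defaults).get? "default_unknown"

-- ===== PORT B =====
-- Source B's _PRIORITY dict, in insertion order
def pvPriority_check_defaults_py : List (String × Nat) :=
  [("switch", 0), ("nexus", 0), ("catalyst", 0),
   ("router", 1), ("isr", 1), ("asr", 1),
   ("firewall", 2), ("asa", 2), ("ftd", 2),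
   ("phone", 3), ("voip", 3),
   ("server", 4), ("virtual", 4)]

-- Source B's _KEYS list
def pvKeys_check_defaults_py : List String :=
  ["default_switch", "default_router", "default_firewall",
   "default_phone", "default_server", "default_unknown"]

-- Source B's for-loop: full pass keeping the minimum matched priority
def pvBest_check_defaults_py : List (String × Nat) → String → Nat → Nat
  | [], _, best => best
  | (term, pri) :: rest, platform, best =>
      pvBest_check_defaults_py rest platform
        (if pri < best ∧ PySem.Str.isIn term platform = true then pri else best)

def check_defaults_py_alt (defaults : List (String × String)) (platform : String) (node_id : String) : Option String :=
  (PySem.Dict.mk defaults).get?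
    ((pvKeys_check_defaults_py).getD (pvBest_check_defaults_py pvPriority_check_defaults_py platform 5) "default_unknown")

-- ===== PRECONDITION & SPEC =====
def Spec_check_defaults_py (defaults : List (String × String)) (platform : String) (node_id : String) (out : Option String) : Prop := out = check_defaults_py_alt defaults platform node_id
instance (defaults : List (String × String)) (platform : String) (node_id : String) (out : Option String) : Decidable (Spec_check_defaults_py defaults platform node_id out) := by unfold Spec_check_defaults_py; infer_instance

-- ===== CLAIM (what is proved, stated in full; the proofs are below) =====
def Claim_equal_check_defaults_py : Prop := ∀ (defaults : List (String × String)) (platform : String) (node_id : String), Dom_check_defaults_py defaults platform node_id → Spec_check_defaults_py defaults platform node_id (check_defaults_py defaults platform node_id)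

-- ===== LEMMAS AND PROOFS =====
-- once the accumulator is ≤ every remaining priority, the fold never updates it
theorem pvBest_const_check_defaults_py (l : List (String × Nat)) (pf : String) (b : Nat)
    (h : ∀ x ∈ l, ¬ x.2 < b) : pvBest_check_defaults_py l pf b = b := by
  induction l with
  | nil => rfl
  | cons hd tl ih =>
      obtain ⟨t, p⟩ := hd
      simp only [pvBest_check_defaults_py]
      rw [if_neg (fun hc => h (t, p) (List.mem_cons_self) hc.1)]
      exact ih (fun x hx => h x (List.mem_cons_of_mem _ hx))

-- on a list with nondecreasing priorities all below the start, the minimum matched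
-- priority is the priority of the FIRST matched keyword
theorem pvBest_eq_find_check_defaults_py (l : List (String × Nat)) (pf : String) (b : Nat)
    (hsort : l.Pairwise (fun x y => x.2 ≤ y.2)) (hb : ∀ x ∈ l, x.2 < b) :
    pvBest_check_defaults_py l pf b
      = ((l.find? (fun x => PySem.Str.isIn x.1 pf)).map Prod.snd).getD b := by
  induction l generalizing b with
  | nil => rfl
  | cons hd tl ih =>
      obtain ⟨t, p⟩ := hd
      have hp : p < b := hb (t, p) (List.mem_cons_self)
      have hrest : ∀ x ∈ tl, p ≤ x.2 := by
        intro x hx; exact (List.pairwise_cons.mp hsort).1 x hx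
      simp only [pvBest_check_defaults_py, List.find?_cons]
      cases hin : PySem.Str.isIn t pf with
      | true =>
          rw [if_pos ⟨hp, rfl⟩]
          simp only [Option.map_some, Option.getD_some]
          exact pvBest_const_check_defaults_py tl pf p
            (fun x hx hc => absurd (hrest x hx) (Nat.not_le_of_lt hc))
      | false =>
          rw [if_neg (fun hc => by cases hc.2)]
          exact ih b (List.pairwise_cons.mp hsort).2 (fun x hx => hb x (List.mem_cons_of_mem _ hx))

-- the two key computations agree for every combination of the 13 keyword-match booleans
theorem pvKey_eq_check_defaults_py (platform : String) :
    (if ["switch", "nexus", "catalyst"].any (fun term => PySem.Str.isIn term platform) then "default_switch"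
     else if ["router", "isr", "asr"].any (fun term => PySem.Str.isIn term platform) then "default_router"
     else if ["firewall", "asa", "ftd"].any (fun term => PySem.Str.isIn term platform) then "default_firewall"
     else if ["phone", "voip"].any (fun term => PySem.Str.isIn term platform) then "default_phone"
     else if ["server", "virtual"].any (fun term => PySem.Str.isIn term platform) then "default_server"
     else "default_unknown")
    = (pvKeys_check_defaults_py).getD (pvBest_check_defaults_py pvPriority_check_defaults_py platform 5) "default_unknown" := by
  rw [pvBest_eq_find_check_defaults_py pvPriority_check_defaults_py platform 5
      (by decide) (by decide)]
  simp only [pvPriority_check_defaults_py, pvKeys_check_defaults_py,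
    List.find?_cons, List.find?_nil, List.any_cons, List.any_nil, Bool.or_false]
  generalize PySem.Str.isIn "switch" platform = b1
  generalize PySem.Str.isIn "nexus" platform = b2
  generalize PySem.Str.isIn "catalyst" platform = b3
  generalize PySem.Str.isIn "router" platform = b4
  generalize PySem.Str.isIn "isr" platform = b5
  generalize PySem.Str.isIn "asr" platform = b6
  generalize PySem.Str.isIn "firewall" platform = b7
  generalize PySem.Str.isIn "asa" platform = b8
  generalize PySem.Str.isIn "ftd" platform = b9
  generalize PySem.Str.isIn "phone" platform = b10
  generalize PySem.Str.isIn "voip" platform = b11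
  generalize PySem.Str.isIn "server" platform = b12
  generalize PySem.Str.isIn "virtual" platform = b13
  revert b1 b2 b3 b4 b5 b6 b7 b8 b9 b10 b11 b12 b13
  decide

-- ===== VERDICT (by name: the statement is the Claim_ definition above) =====
theorem check_defaults_py_spec : Claim_equal_check_defaults_py := by
  intro defaults platform node_id _
  unfold Spec_check_defaults_py check_defaults_py check_defaults_py_alt
  rw [← pvKey_eq_check_defaults_py platform]
  simp only [apply_ite ((PySem.Dict.mk defaults).get?)]
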